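-- pv_equiv track=rewrite | github.com/liorkup/pausee | pausee.py | campaigns_to_pause
-- ===== SOURCE A (Python) =====
-- def campaigns_to_pause(campaigns_dict, tot_installs_count, pause_limit):
--     cur_installs_count = 0
--     campaigns_to_pause_dict = {}
--     for campaign in campaigns_dict.items():
--         count = campaign[1]['count']
--         cur_installs_count += count
--         campaigns_to_pause_dict.update({campaign[0]: campaign[1]})
--         if tot_installs_count - cur_installs_count < pause_limit:
--             break
--     return campaigns_to_pause_dict
-- ===== SOURCE B (Python) =====
-- def campaigns_to_pause(campaigns_dict, tot_installs_count, pause_limit):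
--     items = list(campaigns_dict.items())
--     prefix = []
--     running = 0
--     for _, v in items:
--         running += v['count']
--         prefix.append(running)
--     cut = next((i + 1 for i, p in enumerate(prefix)
--                 if tot_installs_count - p < pause_limit), len(items))
--     return dict(items[:cut])
-- ===== Notes on version B (the rewrite author's own statement) =====
-- stated objective: alternative
-- what changed: B first materialises the items and their running-sum table, then finds the cutoff index by a scan and slices, instead of A's single loop that mutates a result dict and breaks early.
-- outside the precondition, e.g. on campaigns_to_pause({'a': {'count': 5}, 'b': {}}, 5, 1): A returns {'a': {'count': 5}}, B raises KeyError
import Mathlib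
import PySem

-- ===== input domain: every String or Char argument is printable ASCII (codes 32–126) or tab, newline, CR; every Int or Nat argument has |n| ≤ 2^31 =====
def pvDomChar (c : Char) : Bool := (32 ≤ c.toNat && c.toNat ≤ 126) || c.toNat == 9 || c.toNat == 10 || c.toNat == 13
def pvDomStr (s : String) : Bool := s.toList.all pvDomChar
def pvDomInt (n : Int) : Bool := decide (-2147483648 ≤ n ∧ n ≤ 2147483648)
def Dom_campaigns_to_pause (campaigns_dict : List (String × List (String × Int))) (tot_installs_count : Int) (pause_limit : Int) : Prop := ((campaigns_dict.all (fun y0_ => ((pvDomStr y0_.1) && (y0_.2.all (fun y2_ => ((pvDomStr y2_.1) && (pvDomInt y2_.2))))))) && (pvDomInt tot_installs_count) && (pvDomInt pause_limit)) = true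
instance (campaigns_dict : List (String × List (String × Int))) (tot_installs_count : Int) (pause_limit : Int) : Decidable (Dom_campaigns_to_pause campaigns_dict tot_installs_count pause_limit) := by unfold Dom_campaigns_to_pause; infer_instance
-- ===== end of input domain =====

-- B replaces A's break-early loop over a mutated result dict by a running-sum table,
-- a scan for the cutoff index and a slice (alternative decomposition, same cost).

-- ===== PORT A =====
-- A's for-loop with break: structural recursion over the items, carrying
-- cur_installs_count and the accumulated dict.  v['count'] is ported as
-- getD "count" 0, exact under Pre_ (Python raises KeyError when absent).
def ctpLoopA : List (String × List (String × Int)) → Int → Int → Int →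
    PySem.Dict String (List (String × Int)) → PySem.Dict String (List (String × Int))
  | [], _, _, _, acc => acc
  | (k, v) :: rest, tot, lim, cur, acc =>
      let count := (PySem.Dict.mk v).getD "count" 0
      let cur' := cur + count
      let acc' := acc.insert k v
      if tot - cur' < lim then acc' else ctpLoopA rest tot lim cur' acc'

def campaigns_to_pause (campaigns_dict : List (String × List (String × Int))) (tot_installs_count : Int) (pause_limit : Int) : List (String × List (String × Int)) :=
  (ctpLoopA campaigns_dict tot_installs_count pause_limit 0 PySem.Dict.empty).items

-- ===== PORT B =====
-- running-sum table (Source B's prefix list)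
def ctpPrefixB : Int → List (String × List (String × Int)) → List Int
  | _, [] => []
  | t, (_, v) :: rest =>
      let t' := t + (PySem.Dict.mk v).getD "count" 0
      t' :: ctpPrefixB t' rest

-- the `next(... , len(items))` scan for the cutoff index
def ctpCutB (tot lim : Int) : Nat → List Int → Nat
  | i, [] => i
  | i, p :: ps => if tot - p < lim then i + 1 else ctpCutB tot lim (i + 1) ps

def campaigns_to_pause_alt (campaigns_dict : List (String × List (String × Int))) (tot_installs_count : Int) (pause_limit : Int) : List (String × List (String × Int)) :=
  (PySem.Dict.ofList (campaigns_dict.take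
      (ctpCutB tot_installs_count pause_limit 0 (ctpPrefixB 0 campaigns_dict)))).items

-- ===== PRECONDITION & SPEC =====
-- Pre_ keeps the well-formed dict-of-dicts inputs: outer and inner key lists without
-- duplicates (a Python dict argument cannot carry duplicate keys, so duplicate-key
-- association lists correspond to no Python input) and every campaign carrying a
-- 'count' field (on a campaign missing 'count', Python A raises KeyError unless its
-- break already fired earlier; B evaluates every count, so those inputs are excluded).
def Pre_campaigns_to_pause (campaigns_dict : List (String × List (String × Int))) (tot_installs_count : Int) (pause_limit : Int) : Prop :=
  (campaigns_dict.map Prod.fst).Nodup ∧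
  ∀ p ∈ campaigns_dict, (p.2.map Prod.fst).Nodup ∧ "count" ∈ p.2.map Prod.fst
instance (campaigns_dict : List (String × List (String × Int))) (tot_installs_count : Int) (pause_limit : Int) : Decidable (Pre_campaigns_to_pause campaigns_dict tot_installs_count pause_limit) := by unfold Pre_campaigns_to_pause; infer_instance

def pvWitness_campaigns_to_pause : (List (String × List (String × Int))) × Int × Int :=
  ([("a", [("count", 2)]), ("b", [("count", 3)])], 5, 1)

def Spec_campaigns_to_pause (campaigns_dict : List (String × List (String × Int))) (tot_installs_count : Int) (pause_limit : Int) (out : List (String × List (String × Int))) : Prop := out = campaigns_to_pause_alt campaigns_dict tot_installs_count pause_limit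
instance (campaigns_dict : List (String × List (String × Int))) (tot_installs_count : Int) (pause_limit : Int) (out : List (String × List (String × Int))) : Decidable (Spec_campaigns_to_pause campaigns_dict tot_installs_count pause_limit out) := by unfold Spec_campaigns_to_pause; infer_instance

-- ===== CLAIM (what is proved, stated in full; the proofs are below) =====
def Claim_equal_campaigns_to_pause : Prop := ∀ (campaigns_dict : List (String × List (String × Int))) (tot_installs_count : Int) (pause_limit : Int), Dom_campaigns_to_pause campaigns_dict tot_installs_count pause_limit → Pre_campaigns_to_pause campaigns_dict tot_installs_count pause_limit → Spec_campaigns_to_pause campaigns_dict tot_installs_count pause_limit (campaigns_to_pause campaigns_dict tot_installs_count pause_limit)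

-- ===== LEMMAS AND PROOFS =====

-- the scan index only shifts the result
theorem ctpCutB_succ (tot lim : Int) (ps : List Int) : ∀ i : Nat,
    ctpCutB tot lim (i + 1) ps = ctpCutB tot lim i ps + 1 := by
  induction ps with
  | nil => intro i; rfl
  | cons p ps ih =>
      intro i
      simp only [ctpCutB]
      split_ifs <;> simp [ih]

-- dict(l) over a duplicate-free association list is l itself
theorem ofList_items_of_nodup (l : List (String × List (String × Int)))
    (h : (l.map Prod.fst).Nodup) : (PySem.Dict.ofList l).items = l := by
  have : ∀ (l : List (String × List (String × Int)))
      (d : PySem.Dict String (List (String × Int))),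
      (l.map Prod.fst).Nodup → (∀ p ∈ l, d.contains p.1 = false) →
      (l.foldl (fun d p => d.insert p.1 p.2) d).items = d.items ++ l := by
    intro l
    induction l with
    | nil => intro d _ _; simp
    | cons p rest ih =>
        intro d hnd hfree
        simp only [List.foldl_cons]
        have hpc : d.contains p.1 = false := hfree p (by simp)
        have hstep : (d.insert p.1 p.2).items = d.items ++ [p] :=
          PySem.Dict.items_insert_of_not_contains _ _ hpc
        have hnd' : (rest.map Prod.fst).Nodup := (List.nodup_cons.mp (by rw [List.map_cons] at hnd; exact hnd)).2
        have hfree' : ∀ q ∈ rest, (d.insert p.1 p.2).contains q.1 = false := by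
          intro q hq
          have hne : q.1 ≠ p.1 := by
            have := (List.nodup_cons.mp (by rw [List.map_cons] at hnd; exact hnd)).1
            intro he; exact this (by simpa [he] using List.mem_map_of_mem (f := Prod.fst) hq)
          rw [PySem.Dict.contains_insert]
          simp [hne, hfree q (List.mem_cons_of_mem _ hq)]
        rw [ih _ hnd' hfree', hstep]
        simp
  have h0 := this l PySem.Dict.empty h (by intro p _; simp [PySem.Dict.contains_empty])
  simpa [PySem.Dict.ofList] using h0
  
-- main invariant: A's break-loop appends exactly the slice B takes
theorem ctpLoopA_eq_take (cd : List (String × List (String × Int)))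
    (tot lim : Int) : ∀ (cur : Int) (acc : PySem.Dict String (List (String × Int))),
    (cd.map Prod.fst).Nodup → (∀ p ∈ cd, acc.contains p.1 = false) →
    (ctpLoopA cd tot lim cur acc).items =
      acc.items ++ cd.take (ctpCutB tot lim 0 (ctpPrefixB cur cd)) := by
  induction cd with
  | nil => intro cur acc _ _; simp [ctpLoopA, ctpPrefixB, ctpCutB]
  | cons p rest ih =>
      intro cur acc hnd hfree
      obtain ⟨k, v⟩ := p
      have hkc : acc.contains k = false := hfree (k, v) (by simp)
      have hstep : (acc.insert k v).items = acc.items ++ [(k, v)] :=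
        PySem.Dict.items_insert_of_not_contains _ _ hkc
      simp only [ctpLoopA, ctpPrefixB, ctpCutB]
      split_ifs with hc
      · simp [hstep, List.take_succ_cons]
      · have hnd' : (rest.map Prod.fst).Nodup := (List.nodup_cons.mp (by rw [List.map_cons] at hnd; exact hnd)).2
        have hfree' : ∀ q ∈ rest, (acc.insert k v).contains q.1 = false := by
          intro q hq
          have hne : q.1 ≠ k := by
            have := (List.nodup_cons.mp (by rw [List.map_cons] at hnd; exact hnd)).1
            intro he; exact this (by simpa [he] using List.mem_map_of_mem (f := Prod.fst) hq)
          rw [PySem.Dict.contains_insert]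
          simp [hne, hfree q (List.mem_cons_of_mem _ hq)]
        rw [ih _ _ hnd' hfree', hstep, ctpCutB_succ]
        simp [List.take_succ_cons]

-- ===== VERDICT (by name: the statement is the Claim_ definition above) =====
theorem campaigns_to_pause_spec : Claim_equal_campaigns_to_pause := by
  intro cd tot lim _ hpre
  unfold Spec_campaigns_to_pause campaigns_to_pause campaigns_to_pause_alt
  obtain ⟨hnd, _⟩ := hpre
  rw [ctpLoopA_eq_take cd tot lim 0 PySem.Dict.empty hnd
      (by intro p _; simp [PySem.Dict.contains_empty]),
    ofList_items_of_nodup _ (((List.take_sublist _ cd).map Prod.fst).nodup hnd)]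
  simp [PySem.Dict.empty]
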